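-- pv_equiv track=rewrite | github.com/zby19970810/DMCAVD | preprocess/standardization.py | lineNormOneFile
-- ===== SOURCE A (Python) =====
-- def lineNormOneFile(code):
--     countForSmall=0
--     countForMid=0
--     newCode=""
--     for each in code:
--         if each=="(": countForSmall+=1
--         elif each=="[": countForMid+=1
--         elif each==")": countForSmall-=1
--         elif each=="]": countForMid-=1
--         if not (countForSmall==0 and countForMid==0):
--             if each!="\n":
--                 newCode+=each
--         else:
--             newCode += each
--     return newCode
-- ===== SOURCE B (Python) =====
-- def lineNormOneFile(code):
--     lines = code.split('\n')
--     pieces = [lines[0]]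
--     s = m = 0
--     for prev, cur in zip(lines, lines[1:]):
--         s += prev.count('(') - prev.count(')')
--         m += prev.count('[') - prev.count(']')
--         pieces.append(('\n' if s == 0 and m == 0 else '') + cur)
--     return ''.join(pieces)
-- ===== Notes on version B (the rewrite author's own statement) =====
-- stated objective: faster
-- what changed: Instead of A's character-by-character Python loop that tracks depths and concatenates chars one at a time, B splits the input into lines, computes each line's bracket balance with str.count, and joins consecutive lines with or without the separating newline depending on the running balance at that line break.
import Mathlib
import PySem

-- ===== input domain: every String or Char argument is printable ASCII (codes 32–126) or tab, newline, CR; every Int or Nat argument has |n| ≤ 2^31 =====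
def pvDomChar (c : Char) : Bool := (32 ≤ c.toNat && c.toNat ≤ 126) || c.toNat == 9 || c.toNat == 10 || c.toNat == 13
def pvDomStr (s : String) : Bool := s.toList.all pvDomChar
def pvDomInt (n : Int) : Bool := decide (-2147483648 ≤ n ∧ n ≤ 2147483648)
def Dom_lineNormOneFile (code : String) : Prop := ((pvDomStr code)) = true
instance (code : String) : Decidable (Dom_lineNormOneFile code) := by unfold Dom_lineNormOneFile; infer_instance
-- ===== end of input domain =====

-- B replaces A's character-by-character depth-tracking scan by a line-based pass:
-- split on '\n', compute each line's bracket balance with str.count, and re-join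
-- consecutive lines with or without the newline depending on the running balance
-- (objective: faster — same O(n), constant-factor win measured).

-- ===== PORT A =====
-- one loop over the chars: two depth counters updated by an elif chain, output grown by +=
def pvStepA (st : Int × Int × List Char) (each : Char) : Int × Int × List Char :=
  let p : Int × Int :=
    if each = '(' then (st.1 + 1, st.2.1)
    else if each = '[' then (st.1, st.2.1 + 1)
    else if each = ')' then (st.1 - 1, st.2.1)
    else if each = ']' then (st.1, st.2.1 - 1)
    else (st.1, st.2.1)
  let acc : List Char :=
    if ¬(p.1 = 0 ∧ p.2 = 0) then
      (if each ≠ '\n' then st.2.2 ++ [each] else st.2.2)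
    else st.2.2 ++ [each]
  (p.1, p.2, acc)

def lineNormOneFile (code : String) : String :=
  String.mk (code.toList.foldl pvStepA (0, 0, [])).2.2

-- ===== PORT B =====
-- Source B: lines = code.split('\n'); pieces = [lines[0]]; for prev, cur in zip(lines, lines[1:]):
--   update the running balances with prev.count(...) and append ('\n' or '') + cur; ''.join(pieces)
def lineNormOneFile_alt (code : String) : String :=
  let lines := PySem.Chars.splitOn code.toList ['\n']
  match lines with
  | [] => ""  -- unreachable: str.split never returns an empty list
  | l0 :: rest =>
    let r := ((l0 :: rest).zip rest).foldl
      (fun st p =>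
        let s := st.1 + ((PySem.Chars.count p.1 ['('] : Int) - (PySem.Chars.count p.1 [')'] : Int))
        let m := st.2.1 + ((PySem.Chars.count p.1 ['['] : Int) - (PySem.Chars.count p.1 [']'] : Int))
        (s, m, st.2.2 ++ [(if s = 0 ∧ m = 0 then ['\n'] else []) ++ p.2]))
      ((0 : Int), (0 : Int), ([l0] : List (List Char)))
    String.mk (PySem.Chars.join [] r.2.2)

-- ===== PRECONDITION & SPEC =====
def Spec_lineNormOneFile (code : String) (out : String) : Prop := out = lineNormOneFile_alt code
instance (code : String) (out : String) : Decidable (Spec_lineNormOneFile code out) := by unfold Spec_lineNormOneFile; infer_instance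

-- ===== CLAIM (what is proved, stated in full; the proofs are below) =====
def Claim_equal_lineNormOneFile : Prop := ∀ (code : String), Dom_lineNormOneFile code → Spec_lineNormOneFile code (lineNormOneFile code)

-- ===== LEMMAS AND PROOFS =====

-- per-char bracket deltas and per-line balances
def pvDeltaS (c : Char) : Int := if c = '(' then 1 else if c = ')' then -1 else 0
def pvDeltaM (c : Char) : Int := if c = '[' then 1 else if c = ']' then -1 else 0
def pvSumS (l : List Char) : Int := (l.count '(' : Int) - (l.count ')' : Int)
def pvSumM (l : List Char) : Int := (l.count '[' : Int) - (l.count ']' : Int)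

-- common reference function: inclusive-depth newline filter
def pvG : List Char → Int → Int → List Char
  | [], _, _ => []
  | c :: l, s, m =>
    (if c ≠ '\n' ∨ (s + pvDeltaS c = 0 ∧ m + pvDeltaM c = 0) then [c] else [])
      ++ pvG l (s + pvDeltaS c) (m + pvDeltaM c)

lemma pvStepA_counters (st : Int × Int × List Char) (c : Char) :
    (pvStepA st c).1 = st.1 + pvDeltaS c ∧ (pvStepA st c).2.1 = st.2.1 + pvDeltaM c := by
  by_cases h1 : c = '(' <;> by_cases h2 : c = '[' <;> by_cases h3 : c = ')' <;>
    by_cases h4 : c = ']' <;> simp_all [pvStepA, pvDeltaS, pvDeltaM] <;> try omega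

lemma pvLoopA (l : List Char) : ∀ (s m : Int) (acc : List Char),
    (l.foldl pvStepA (s, m, acc)).2.2 = acc ++ pvG l s m := by
  induction l with
  | nil => intro s m acc; simp [pvG]
  | cons c l ih =>
    intro s m acc
    have hc := pvStepA_counters (s, m, acc) c
    have hstep : pvStepA (s, m, acc) c =
        (s + pvDeltaS c, m + pvDeltaM c,
          if c ≠ '\n' ∨ (s + pvDeltaS c = 0 ∧ m + pvDeltaM c = 0) then acc ++ [c] else acc) := by
      obtain ⟨h1, h2⟩ := hc
      simp only [pvStepA] at h1 h2 ⊢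
      refine Prod.ext h1 (Prod.ext h2 ?_)
      simp only [h1, h2] at *
      by_cases hz : (s + pvDeltaS c = 0 ∧ m + pvDeltaM c = 0)
      · simp [hz]
      · by_cases hn : c = '\n' <;> simp [hz, hn] <;> split_ifs <;> first | rfl | tauto
    rw [List.foldl_cons, hstep, ih, pvG]
    by_cases h : c ≠ '\n' ∨ (s + pvDeltaS c = 0 ∧ m + pvDeltaM c = 0) <;> simp [h]

-- PySem.Chars.count with a single-char needle is List.count
lemma pvCountGo (c : Char) : ∀ (l : List Char) (fuel acc : Nat), l.length ≤ fuel →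
    PySem.Chars.count.go [c] fuel l acc = acc + l.count c := by
  intro l
  induction l with
  | nil => intro fuel acc h; cases fuel <;> simp [PySem.Chars.count.go]
  | cons x t ih =>
    intro fuel acc h
    cases fuel with
    | zero => simp at h
    | succ f =>
      simp only [List.length_cons] at h
      simp only [PySem.Chars.count.go, List.isPrefixOf, Bool.and_true]
      by_cases hx : c = x
      · subst hx
        simp only [beq_self_eq_true, if_pos]
        have hd : List.drop [c].length (c :: t) = t := by simp
        rw [hd, ih f (acc + 1) (by omega), List.count_cons]
        simp
        omega
      · have hbe : (c == x) = false := by simp [hx]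
        rw [hbe]
        simp only [Bool.false_eq_true, if_false]
        rw [ih f acc (by omega), List.count_cons]
        simp [Ne.symm hx]

lemma pvCount (c : Char) (l : List Char) : PySem.Chars.count l [c] = l.count c := by
  simp only [PySem.Chars.count, List.isEmpty_cons, Bool.false_eq_true, if_false]
  simpa using pvCountGo c l l.length 0 le_rfl

-- the lines of a char list (split on '\n')
def pvLines : List Char → List (List Char)
  | [] => [[]]
  | c :: rest =>
    if c = '\n' then [] :: pvLines rest
    else
      match pvLines rest with
      | [] => [[c]]
      | h :: t => (c :: h) :: t

def pvConsHead (pre : List Char) : List (List Char) → List (List Char)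
  | [] => [pre]
  | h :: t => (pre ++ h) :: t

lemma pvLines_ne_nil (l : List Char) : pvLines l ≠ [] := by
  cases l with
  | nil => simp [pvLines]
  | cons c rest =>
    simp only [pvLines]
    split_ifs
    · simp
    · cases h : pvLines rest <;> simp

lemma pvSplitGo : ∀ (l cur : List Char) (fuel : Nat) (acc : List (List Char)), l.length ≤ fuel →
    PySem.Chars.splitOn.go ['\n'] fuel l cur acc =
      acc.reverse ++ pvConsHead cur.reverse (pvLines l) := by
  intro l
  induction l with
  | nil =>
    intro cur fuel acc h
    cases fuel <;> simp [PySem.Chars.splitOn.go, pvLines, pvConsHead]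
  | cons c rest ih =>
    intro cur fuel acc h
    cases fuel with
    | zero => simp at h
    | succ f =>
      simp only [List.length_cons] at h
      by_cases hc : c = '\n'
      · subst hc
        have hpre : List.isPrefixOf ['\n'] ('\n' :: rest) = true := by
          simp [List.isPrefixOf]
        simp only [PySem.Chars.splitOn.go, hpre, if_pos, List.length_cons, List.length_nil,
          Nat.zero_add, List.drop_succ_cons, List.drop_zero]
        rw [ih [] f (cur.reverse :: acc) (by omega)]
        cases hL : pvLines rest with
        | nil => exact absurd hL (pvLines_ne_nil rest)
        | cons h0 t0 =>
          simp [pvLines, pvConsHead, hL]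
      · have hpre : List.isPrefixOf ['\n'] (c :: rest) = false := by
          simp [List.isPrefixOf]
          exact fun hx => hc hx.symm
        simp only [PySem.Chars.splitOn.go, hpre, Bool.false_eq_true, if_false]
        rw [ih (c :: cur) f acc (by omega)]
        cases hL : pvLines rest with
        | nil => exact absurd hL (pvLines_ne_nil rest)
        | cons h0 t0 =>
          simp [pvLines, pvConsHead, hc, hL]

lemma pvSplitOn (l : List Char) : PySem.Chars.splitOn l ['\n'] = pvLines l := by
  rw [PySem.Chars.splitOn, pvSplitGo l [] (l.length + 1) [] (by omega)]
  cases hL : pvLines l with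
  | nil => exact absurd hL (pvLines_ne_nil l)
  | cons h0 t0 => simp [pvConsHead]

-- joining the lines back with '\n'
def pvInterNL : List (List Char) → List Char
  | [] => []
  | [l] => l
  | l :: ls => l ++ '\n' :: pvInterNL ls

lemma pvInterNL_pvLines (l : List Char) : pvInterNL (pvLines l) = l := by
  induction l with
  | nil => rfl
  | cons c rest ih =>
    by_cases hc : c = '\n'
    · subst hc
      simp only [pvLines, if_pos]
      cases hL : pvLines rest with
      | nil => exact absurd hL (pvLines_ne_nil rest)
      | cons h0 t0 =>
        rw [hL] at ih
        show pvInterNL ([] :: h0 :: t0) = '\n' :: rest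
        simp [pvInterNL, ih]
    · simp only [pvLines, hc, if_false]
      cases hL : pvLines rest with
      | nil => exact absurd hL (pvLines_ne_nil rest)
      | cons h0 t0 =>
        rw [hL] at ih
        cases t0 with
        | nil => simpa [pvInterNL] using congrArg (c :: ·) ih
        | cons t1 ts => simpa [pvInterNL] using congrArg (c :: ·) ih

lemma pvLines_no_nl (l : List Char) : ∀ p ∈ pvLines l, '\n' ∉ p := by
  induction l with
  | nil => intro p hp; simp [pvLines] at hp; simp [hp]
  | cons c rest ih =>
    intro p hp
    by_cases hc : c = '\n'
    · subst hc
      simp only [pvLines, if_pos, List.mem_cons] at hp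
      rcases hp with rfl | hp
      · simp
      · exact ih p hp
    · simp only [pvLines, hc, if_false] at hp
      cases hL : pvLines rest with
      | nil => exact absurd hL (pvLines_ne_nil rest)
      | cons h0 t0 =>
        rw [hL] at hp
        simp only [List.mem_cons] at hp
        rcases hp with rfl | hp
        · intro hmem
          rcases List.mem_cons.mp hmem with h | h
          · exact hc h.symm
          · exact ih h0 (hL ▸ List.mem_cons_self ..) h
        · exact ih p (hL ▸ List.mem_cons_of_mem _ hp)

-- the reference function over a newline-free line just copies it and shifts the balances
lemma pvG_line : ∀ (line : List Char), '\n' ∉ line → ∀ (rest : List Char) (s m : Int),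
    pvG (line ++ rest) s m = line ++ pvG rest (s + pvSumS line) (m + pvSumM line) := by
  intro line
  induction line with
  | nil => intro _ rest s m; simp [pvSumS, pvSumM]
  | cons c t ih =>
    intro h rest s m
    have hc : c ≠ '\n' := fun hx => h (hx ▸ List.mem_cons_self ..)
    have ht : '\n' ∉ t := fun hx => h (List.mem_cons_of_mem _ hx)
    simp only [List.cons_append, pvG, hc, ne_eq, not_false_iff, true_or, if_pos,
      List.singleton_append, ih ht]
    have hs : s + pvDeltaS c + pvSumS t = s + pvSumS (c :: t) := by
      simp only [pvDeltaS, pvSumS, List.count_cons]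
      by_cases h1 : c = '(' <;> by_cases h2 : c = ')' <;> simp_all <;> push_cast <;> ring
    have hm : m + pvDeltaM c + pvSumM t = m + pvSumM (c :: t) := by
      simp only [pvDeltaM, pvSumM, List.count_cons]
      by_cases h1 : c = '[' <;> by_cases h2 : c = ']' <;> simp_all <;> push_cast <;> ring
    rw [hs, hm]
    simp

lemma pvG_nl (rest : List Char) (s m : Int) :
    pvG ('\n' :: rest) s m = (if s = 0 ∧ m = 0 then ['\n'] else []) ++ pvG rest s m := by
  simp [pvG, pvDeltaS, pvDeltaM]

-- B's line loop, in recursive form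
def pvBgo : List Char → List (List Char) → Int → Int → List (List Char)
  | _, [], _, _ => []
  | prev, cur :: ls, s, m =>
    ((if s + pvSumS prev = 0 ∧ m + pvSumM prev = 0 then ['\n'] else []) ++ cur)
      :: pvBgo cur ls (s + pvSumS prev) (m + pvSumM prev)

lemma pvMain : ∀ (rest : List (List Char)) (prev : List Char) (s m : Int),
    '\n' ∉ prev → (∀ p ∈ rest, '\n' ∉ p) →
    pvG (pvInterNL (prev :: rest)) s m = prev ++ (pvBgo prev rest s m).flatten := by
  intro rest
  induction rest with
  | nil =>
    intro prev s m hp _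
    simpa [pvInterNL, pvBgo, pvG] using pvG_line prev hp [] s m
  | cons cur ls ih =>
    intro prev s m hp hr
    have hcur : '\n' ∉ cur := hr cur (List.mem_cons_self ..)
    have hls : ∀ p ∈ ls, '\n' ∉ p := fun p hp' => hr p (List.mem_cons_of_mem _ hp')
    have : pvInterNL (prev :: cur :: ls) = prev ++ '\n' :: pvInterNL (cur :: ls) := rfl
    rw [this, pvG_line prev hp, pvG_nl, ih cur (s + pvSumS prev) (m + pvSumM prev) hcur hls,
      pvBgo]
    simp

-- the port's foldl over zip(lines, lines[1:]) is pvBgo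
lemma pvFoldB : ∀ (ls : List (List Char)) (prev : List Char) (s m : Int)
    (pieces : List (List Char)),
    (((prev :: ls).zip ls).foldl
      (fun (st : Int × Int × List (List Char)) (p : List Char × List Char) =>
        (st.1 + ((List.count '(' p.1 : Int) - (List.count ')' p.1 : Int)),
         st.2.1 + ((List.count '[' p.1 : Int) - (List.count ']' p.1 : Int)),
         st.2.2 ++ [(if st.1 + ((List.count '(' p.1 : Int) - (List.count ')' p.1 : Int)) = 0 ∧
                        st.2.1 + ((List.count '[' p.1 : Int) - (List.count ']' p.1 : Int)) = 0
                     then ['\n'] else []) ++ p.2]))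
      (s, m, pieces)).2.2 = pieces ++ pvBgo prev ls s m := by
  intro ls
  induction ls with
  | nil => intro prev s m pieces; simp [pvBgo]
  | cons cur t ih =>
    intro prev s m pieces
    rw [List.zip_cons_cons, List.foldl_cons]
    show (List.foldl _
      (s + pvSumS prev, m + pvSumM prev,
        pieces ++ [(if s + pvSumS prev = 0 ∧ m + pvSumM prev = 0 then ['\n'] else []) ++ cur])
      ((cur :: t).zip t)).2.2 = _
    rw [ih]
    simp [pvBgo]

-- sep-less join is flatten
lemma pvJoinNil : ∀ (ps : List (List Char)), PySem.Chars.join [] ps = ps.flatten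
  | [] => by simp [PySem.Chars.join_nil]
  | [a] => by simp [PySem.Chars.join_singleton]
  | a :: b :: t => by
    rw [PySem.Chars.join_cons_cons, pvJoinNil (b :: t)]
    simp

-- ===== VERDICT (by name: the statement is the Claim_ definition above) =====
theorem lineNormOneFile_spec : Claim_equal_lineNormOneFile := by
  intro code _
  unfold Spec_lineNormOneFile lineNormOneFile lineNormOneFile_alt
  rw [pvLoopA, pvSplitOn]
  cases hL : pvLines code.toList with
  | nil => exact absurd hL (pvLines_ne_nil _)
  | cons l0 rest =>
    simp only [List.nil_append, pvCount]
    rw [pvFoldB]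
    have hnl := pvLines_no_nl code.toList
    rw [hL] at hnl
    have hmain := pvMain rest l0 0 0 (hnl l0 (List.mem_cons_self ..))
      (fun p hp => hnl p (List.mem_cons_of_mem _ hp))
    have hinter : pvInterNL (l0 :: rest) = code.toList := by
      rw [← hL, pvInterNL_pvLines]
    rw [hinter] at hmain
    rw [hmain]
    congr 1
    rw [pvJoinNil]
    rfl
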